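-- pv_equiv track=rewrite | github.com/Marcus7768/ProgIIIG3 | p4.py | def3x3Constraints
-- ===== SOURCE A (Python) =====
-- def def3x3Constraints(IdCols, Dom):
--     Constraints = []
--
--     row_blocks = [IdCols[i:i+3] for i in range(0, 9, 3)]  # [['A','B','C'], ['D','E','F'], ['G','H','I']]
--     col_blocks = [list(range(i, i+3)) for i in range(1, 10, 3)]  # [[1,2,3], [4,5,6], [7,8,9]]
--
--     for rows in row_blocks:
--         for cols in col_blocks:
--             block = [f"{r}{c}" for r in rows for c in cols]
--             Constraints.append(block)
--
--     return Constraints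
-- ===== SOURCE B (Python) =====
-- def def3x3Constraints(IdCols, Dom):
--     blocks = [[] for _ in range(9)]
--     for ri, r in enumerate(IdCols[:9]):
--         base = (ri // 3) * 3
--         for ci in range(9):
--             blocks[base + ci // 3].append(f"{r}{ci + 1}")
--     return blocks
-- ===== Notes on version B (the rewrite author's own statement) =====
-- stated objective: alternative
-- what changed: Replaces A's slicing of IdCols into row blocks and Cartesian product per (row-block, col-block) pair by a single scatter pass that appends each cell label into one of nine preallocated bins indexed by (ri//3)*3 + ci//3.
import Mathlib
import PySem

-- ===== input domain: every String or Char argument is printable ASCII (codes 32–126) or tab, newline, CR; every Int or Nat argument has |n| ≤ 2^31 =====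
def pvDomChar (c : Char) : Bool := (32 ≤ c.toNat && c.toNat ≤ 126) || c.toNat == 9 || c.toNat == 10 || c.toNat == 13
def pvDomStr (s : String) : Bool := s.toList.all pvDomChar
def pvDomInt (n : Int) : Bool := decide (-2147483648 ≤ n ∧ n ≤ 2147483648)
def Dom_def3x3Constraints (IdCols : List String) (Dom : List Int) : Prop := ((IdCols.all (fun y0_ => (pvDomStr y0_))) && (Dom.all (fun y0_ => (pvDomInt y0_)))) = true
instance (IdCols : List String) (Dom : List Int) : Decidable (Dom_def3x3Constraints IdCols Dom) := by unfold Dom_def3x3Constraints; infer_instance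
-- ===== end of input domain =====

-- B replaces A's slice-then-Cartesian-product construction by a single scatter pass
-- into nine preallocated bins (objective: alternative decomposition, same cost).

-- ===== PORT A =====
def def3x3Constraints (IdCols : List String) (_Dom : List Int) : List (List String) :=
  let row_blocks := (PySem.List.pyRange 0 9 3).map
    (fun i => PySem.List.slice IdCols (some i) (some (i + 3)))
  let col_blocks := (PySem.List.pyRange 1 10 3).map
    (fun i => PySem.List.pyRange i (i + 3) 1)
  row_blocks.foldl (fun Constraints rows =>
    col_blocks.foldl (fun Constraints cols =>
      Constraints ++ [rows.flatMap (fun r => cols.map (fun c => r ++ PySem.Int.toStr c))])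
      Constraints) []

-- ===== PORT B =====
-- blocks[base + ci//3].append(...) : the index is always a Nat in 0..8, so List.modify
-- at the (provably nonnegative) index is exact Python list indexing here.
def def3x3Constraints_alt (IdCols : List String) (_Dom : List Int) : List (List String) :=
  (PySem.List.enumerate (PySem.List.slice IdCols none (some 9))).foldl
    (fun blocks rir =>
      let base := (PySem.Int.floordiv rir.1 3) * 3
      (PySem.List.pyRange 0 9 1).foldl
        (fun blocks ci =>
          blocks.modify (base + PySem.Int.floordiv ci 3).toNat
            (fun blk => blk ++ [rir.2 ++ PySem.Int.toStr (ci + 1)]))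
        blocks)
    (List.replicate 9 ([] : List String))

-- ===== PRECONDITION & SPEC =====
def Spec_def3x3Constraints (IdCols : List String) (Dom : List Int) (out : List (List String)) : Prop := out = def3x3Constraints_alt IdCols Dom
instance (IdCols : List String) (Dom : List Int) (out : List (List String)) : Decidable (Spec_def3x3Constraints IdCols Dom out) := by unfold Spec_def3x3Constraints; infer_instance

-- ===== CLAIM (what is proved, stated in full; the proofs are below) =====
def Claim_equal_def3x3Constraints : Prop := ∀ (IdCols : List String) (Dom : List Int), Dom_def3x3Constraints IdCols Dom → Spec_def3x3Constraints IdCols Dom (def3x3Constraints IdCols Dom)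

-- ===== LEMMAS AND PROOFS =====

-- Both sides only look at the first nine elements of IdCols, so a ten-way case
-- split on the shape of IdCols reduces each side to a closed computation.
theorem def3x3Constraints_cases (IdCols : List String) (Dom : List Int) :
    def3x3Constraints IdCols Dom = def3x3Constraints_alt IdCols Dom := by
  match IdCols with
  | [] => rfl
  | [a] => rfl
  | [a,b] => rfl
  | [a,b,c] => rfl
  | [a,b,c,d] => rfl
  | [a,b,c,d,e] => rfl
  | [a,b,c,d,e,f] => rfl
  | [a,b,c,d,e,f,g] => rfl
  | [a,b,c,d,e,f,g,h] => rfl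
  | a::b::c::d::e::f::g::h::i::rest =>
    show def3x3Constraints (a::b::c::d::e::f::g::h::i::rest) Dom
        = def3x3Constraints_alt (a::b::c::d::e::f::g::h::i::rest) Dom
    simp [def3x3Constraints, def3x3Constraints_alt, PySem.List.slice,
      PySem.List.clampIdx, PySem.List.pyRange, PySem.List.enumerate,
      PySem.Int.floordiv, List.modify, List.range_succ]

-- ===== VERDICT (by name: the statement is the Claim_ definition above) =====
theorem def3x3Constraints_spec : Claim_equal_def3x3Constraints := by
  intro IdCols Dom _
  exact def3x3Constraints_cases IdCols Dom
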